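-- pv_equiv track=rewrite | github.com/BrianSerem/anagrams | Anagram.py | getAnagramPeriod
-- ===== SOURCE A (Python) =====
-- def getAnagramPeriod(input_str):
--     # Function to check if a substring can form anagrams
--     def can_form_with_anagrams(s, sub):
--         if len(s) % len(sub) != 0:
--             return False
--         for i in range(0, len(s), len(sub)):
--             if sorted(s[i:i + len(sub)]) != sorted(sub):
--                 return False
--         return True
--
--     # Main loop to find the smallest substring
--     for i in range(1, len(input_str) + 1):
--         substring = input_str[:i]
--         if can_form_with_anagrams(input_str, substring):
--             return len(substring)
--
--     return len(input_str)
-- ===== SOURCE B (Python) =====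
-- def getAnagramPeriod(input_str):
--     n = len(input_str)
--     total = {}
--     for ch in input_str:
--         total[ch] = total.get(ch, 0) + 1
--     # good[p]: the length-p prefix holds exactly the p/n-proportional share of every
--     # character (p * count(c) == n * prefix_count(c)); a block length d works iff
--     # every multiple of d up to n is a good split point.
--     good = [False] * (n + 1)
--     run = {}
--     p = 0
--     for ch in input_str:
--         p += 1
--         run[ch] = run.get(ch, 0) + 1
--         good[p] = all(run.get(c, 0) * n == p * t for c, t in total.items())
--     for d in range(1, n + 1):
--         if n % d == 0 and all(good[k] for k in range(d, n + 1, d)):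
--             return d
--     return n
-- ===== Notes on version B (the rewrite author's own statement) =====
-- stated objective: alternative
-- what changed: B never extracts or compares blocks: it builds running character counts once, marks each position p as a good split point iff the length-p prefix holds the exactly p/n-proportional share of every character, and returns the first divisor of n all of whose multiples are good split points.
import Mathlib
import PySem

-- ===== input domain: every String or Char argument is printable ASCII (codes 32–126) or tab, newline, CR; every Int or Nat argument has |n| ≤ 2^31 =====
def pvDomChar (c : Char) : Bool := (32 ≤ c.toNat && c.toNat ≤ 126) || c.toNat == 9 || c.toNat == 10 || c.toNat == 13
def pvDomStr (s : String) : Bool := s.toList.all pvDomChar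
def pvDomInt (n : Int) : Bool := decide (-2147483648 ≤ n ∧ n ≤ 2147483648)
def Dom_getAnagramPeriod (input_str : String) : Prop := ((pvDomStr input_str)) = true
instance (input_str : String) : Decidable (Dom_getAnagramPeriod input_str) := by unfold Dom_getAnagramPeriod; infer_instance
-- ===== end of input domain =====

-- B never extracts or sorts blocks: it marks each position p whose length-p prefix holds the
-- p/n-proportional share of every character and returns the first divisor of n all of whose
-- multiples are such split points (objective: alternative algorithm).

-- ===== PORT A =====
-- inner helper can_form_with_anagrams
def pvCanFormWithAnagrams (s sub : List Char) : Bool :=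
  if PySem.Int.mod (PySem.List.len s) (PySem.List.len sub) ≠ 0 then false
  else
    -- 'for i in range(0, len(s), len(sub)): if sorted(...) != sorted(sub): return False' then True
    (PySem.List.pyRange 0 (PySem.List.len s) (PySem.List.len sub)).all
      (fun i =>
        PySem.List.sorted (PySem.List.slice s (some i) (some (i + PySem.List.len sub))) (fun x => x) false
          == PySem.List.sorted sub (fun x => x) false)

-- 'for i in range(1, len(input_str) + 1): …' with early return
def pvLoopA (s : List Char) (i : Nat) : Int :=
  if i ≤ s.length then
    let substring := PySem.List.slice s (some 0) (some (i : Int))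
    if pvCanFormWithAnagrams s substring then PySem.List.len substring
    else pvLoopA s (i + 1)
  else PySem.List.len s
termination_by s.length + 1 - i

def getAnagramPeriod (input_str : String) : Int :=
  pvLoopA input_str.toList 1

-- ===== PORT B =====
-- 'total = {}; for ch in input_str: total[ch] = total.get(ch, 0) + 1'
def pvTotal (s : List Char) : PySem.Dict Char Int :=
  s.foldl (fun c ch => c.insert ch (c.getD ch 0 + 1)) PySem.Dict.empty

-- body of 'for ch in input_str: p += 1; run[ch] = run.get(ch, 0) + 1; good[p] = all(…)';
-- the state is (run, p, good[1..p]) — assignments good[p] happen at p = 1, 2, … in order,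
-- so the growing array is the appended list
def pvGoodStep (total : PySem.Dict Char Int) (n : Int)
    (st : PySem.Dict Char Int × Int × List Bool) (ch : Char) :
    PySem.Dict Char Int × Int × List Bool :=
  let p := st.2.1 + 1
  let run := st.1.insert ch (st.1.getD ch 0 + 1)
  let g := total.items.all (fun ct => run.getD ct.1 0 * n == p * ct.2)
  (run, p, st.2.2 ++ [g])

-- 'good = [False] * (n + 1)' then the loop above: good[0] stays False
def pvGood (s : List Char) : List Bool :=
  false :: (s.foldl (pvGoodStep (pvTotal s) (PySem.List.len s)) (PySem.Dict.empty, 0, [])).2.2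

-- 'for d in range(1, n + 1): if n % d == 0 and all(good[k] for k in range(d, n + 1, d)): return d'
-- (good[k] is always in range here, so the default of pyGetD is never used)
def pvLoopB (s : List Char) (good : List Bool) (d : Nat) : Int :=
  if d ≤ s.length then
    if (PySem.Int.mod (PySem.List.len s) (d : Int) == 0
        && (PySem.List.pyRange (d : Int) (PySem.List.len s + 1) (d : Int)).all
             (fun k => PySem.List.pyGetD good k false)) then (d : Int)
    else pvLoopB s good (d + 1)
  else PySem.List.len s
termination_by s.length + 1 - d

def getAnagramPeriod_alt (input_str : String) : Int :=
  pvLoopB input_str.toList (pvGood input_str.toList) 1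

-- ===== PRECONDITION & SPEC =====
def Spec_getAnagramPeriod (input_str : String) (out : Int) : Prop := out = getAnagramPeriod_alt input_str
instance (input_str : String) (out : Int) : Decidable (Spec_getAnagramPeriod input_str out) := by unfold Spec_getAnagramPeriod; infer_instance

-- ===== CLAIM (what is proved, stated in full; the proofs are below) =====
def Claim_equal_getAnagramPeriod : Prop := ∀ (input_str : String), Dom_getAnagramPeriod input_str → Spec_getAnagramPeriod input_str (getAnagramPeriod input_str)

-- ===== LEMMAS AND PROOFS =====

-- the per-position flag B stores at good[p]
def pvFlag (s : List Char) (p : Nat) : Bool :=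
  (PySem.Dict.counter s).items.all
    (fun ct => ((s.take p).count ct.1 : Int) * (s.length : Int) == (p : Int) * ct.2)

theorem pvCounterStep (pre : List Char) (ch : Char) :
    (PySem.Dict.counter pre).insert ch ((PySem.Dict.counter pre).getD ch 0 + 1) =
      PySem.Dict.counter (pre ++ [ch]) := by
  rw [← PySem.Dict.foldl_insert_getD_add_one_eq_counter pre,
      ← PySem.Dict.foldl_insert_getD_add_one_eq_counter (pre ++ [ch]), List.foldl_append]
  rfl

theorem pvGood_fold (t : PySem.Dict Char Int) (n : Int) (l : List Char) :
    ∀ (pre : List Char) (G : List Bool),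
    l.foldl (pvGoodStep t n) (PySem.Dict.counter pre, (pre.length : Int), G) =
    (PySem.Dict.counter (pre ++ l), ((pre.length + l.length : Nat) : Int),
     G ++ (List.range l.length).map (fun j =>
       t.items.all (fun ct =>
         (((pre ++ l).take (pre.length + j + 1)).count ct.1 : Int) * n ==
           ((pre.length + j + 1 : Nat) : Int) * ct.2))) := by
  induction l with
  | nil => intro pre G; simp
  | cons ch l' ih =>
    intro pre G
    have hstep : pvGoodStep t n (PySem.Dict.counter pre, (pre.length : Int), G) ch =
        (PySem.Dict.counter (pre ++ [ch]), (((pre ++ [ch]).length : Nat) : Int),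
         G ++ [t.items.all (fun ct =>
           (((pre ++ [ch]).count ct.1 : Int)) * n ==
             (((pre ++ [ch]).length : Nat) : Int) * ct.2)]) := by
      show ((PySem.Dict.counter pre).insert ch ((PySem.Dict.counter pre).getD ch 0 + 1),
            (pre.length : Int) + 1,
            G ++ [t.items.all (fun ct =>
              ((PySem.Dict.counter pre).insert ch
                  ((PySem.Dict.counter pre).getD ch 0 + 1)).getD ct.1 0 * n ==
                ((pre.length : Int) + 1) * ct.2)]) = _
      rw [pvCounterStep]
      simp only [PySem.Dict.getD_counter, List.length_append, List.length_cons,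
        List.length_nil, Nat.cast_add, Nat.cast_one]
      norm_num
    rw [List.foldl_cons, hstep, ih]
    have h1 : (pre ++ [ch]) ++ l' = pre ++ ch :: l' := by simp
    have hlen : (pre ++ [ch]).length + l'.length = pre.length + (ch :: l').length := by
      simp; omega
    rw [h1, hlen]
    have idx : ∀ j : Nat, (pre ++ [ch]).length + j + 1 = pre.length + (j + 1) + 1 := by
      intro j; simp; omega
    simp only [List.length_cons, List.range_succ_eq_map, List.map_cons, List.map_map,
      List.append_assoc, List.singleton_append, Function.comp_def, Nat.succ_eq_add_one,
      Nat.add_zero, idx]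
    rw [show (pre ++ ch :: l').take (pre.length + 1) = pre ++ [ch] from by
        rw [List.take_append]
        congr 1
        · exact List.take_of_length_le (by omega)
        · rw [show pre.length + 1 - pre.length = 1 from by omega]; rfl,
      show (pre ++ [ch]).length = pre.length + 1 from by simp]

theorem pvGood_eq (s : List Char) :
    pvGood s = false :: (List.range s.length).map (fun j => pvFlag s (j + 1)) := by
  unfold pvGood
  rw [show pvTotal s = PySem.Dict.counter s from
        PySem.Dict.foldl_insert_getD_add_one_eq_counter s,
      show ((PySem.Dict.empty : PySem.Dict Char Int), (0 : Int), ([] : List Bool)) =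
        (PySem.Dict.counter ([] : List Char), ((([] : List Char).length : Nat) : Int),
          ([] : List Bool)) from rfl,
      pvGood_fold]
  simp [pvFlag, PySem.List.len_eq]

theorem pvFlag_iff (s : List Char) (p : Nat) :
    pvFlag s p = true ↔
      ∀ c : Char, c ∈ s → (s.take p).count c * s.length = p * s.count c := by
  unfold pvFlag
  rw [PySem.Dict.items_counter, List.all_eq_true]
  constructor
  · intro h c hc
    have h1 := h (c, (s.count c : Int))
      (List.mem_map.mpr ⟨c, (PySem.Set.mem_ofList s c).mpr hc, rfl⟩)
    rw [beq_iff_eq] at h1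
    have h2 : ((s.take p).count c : Int) * (s.length : Int) =
        (p : Int) * ((s.count c : Nat) : Int) := h1
    exact_mod_cast h2
  · intro h ct hct
    obtain ⟨c, hc, rfl⟩ := List.mem_map.mp hct
    rw [beq_iff_eq]
    show ((s.take p).count c : Int) * (s.length : Int) =
        (p : Int) * ((s.count c : Nat) : Int)
    exact_mod_cast h c ((PySem.Set.mem_ofList s c).mp hc)

-- the mathematical heart: for d ∣ n, all blocks anagrams of the first block ⟺
-- every multiple of d is a proportional split point
theorem pvCore (s : List Char) (d : Nat) (hd : 1 ≤ d) (hdvd : d ∣ s.length) :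
    (∀ m : Nat, m < s.length → d ∣ m →
        ∀ c : Char, ((s.drop m).take d).count c = (s.take d).count c)
    ↔ (∀ p : Nat, 1 ≤ p → p ≤ s.length → d ∣ p →
        ∀ c : Char, c ∈ s → (s.take p).count c * s.length = p * s.count c) := by
  obtain ⟨q, hq⟩ := hdvd
  constructor
  · intro hblk
    have hpref : ∀ k : Nat, k * d ≤ s.length →
        ∀ c : Char, (s.take (k * d)).count c = k * (s.take d).count c := by
      intro k
      induction k with
      | zero => intro _ c; simp
      | succ k ih =>
        intro hk c
        have hk' : k * d ≤ s.length :=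
          le_trans (Nat.mul_le_mul_right d (Nat.le_succ k)) hk
        have hlt : k * d < s.length := by rw [Nat.succ_mul] at hk; omega
        have hsplit : s.take ((k + 1) * d) = s.take (k * d) ++ (s.drop (k * d)).take d := by
          rw [Nat.succ_mul, List.take_add]
        rw [hsplit, List.count_append, ih hk' c, hblk (k * d) hlt (dvd_mul_left d k) c,
          Nat.succ_mul]
    intro p hp1 hpn hdp c _
    obtain ⟨k, rfl⟩ := hdp
    have hkq : k ≤ q := by
      rw [hq] at hpn
      exact Nat.le_of_mul_le_mul_left hpn (by omega)
    have htot : s.count c = q * (s.take d).count c := by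
      have h := hpref q (by rw [hq, Nat.mul_comm]) c
      rw [show q * d = s.length from by rw [hq, Nat.mul_comm], List.take_length] at h
      exact h
    have hp := hpref k (by rw [hq, Nat.mul_comm d q]; exact Nat.mul_le_mul_right d hkq) c
    rw [Nat.mul_comm d k, hp, htot, hq]
    ring
  · intro hgood m hm hdm c
    by_cases hc : c ∈ s
    · have key : ∀ p : Nat, p ≤ s.length → d ∣ p →
          (s.take p).count c * s.length = p * s.count c := by
        intro p hpn hdp
        rcases Nat.eq_zero_or_pos p with h0 | hpos
        · subst h0; simp
        · exact hgood p hpos hpn hdp c hc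
      obtain ⟨a, ha⟩ := hdm
      have haq : a < q := by
        rw [hq, ha] at hm
        exact Nat.lt_of_mul_lt_mul_left hm
      have hmd : m + d ≤ s.length := by
        have : d * (a + 1) ≤ d * q := Nat.mul_le_mul_left d haq
        rw [hq, ha]; omega
      have e1 : (s.take m).count c * s.length = m * s.count c :=
        key m (by omega) ⟨a, ha⟩
      have e2 : (s.take (m + d)).count c * s.length = (m + d) * s.count c :=
        key (m + d) hmd (Nat.dvd_add ⟨a, ha⟩ dvd_rfl)
      have e3 : (s.take d).count c * s.length = d * s.count c :=
        key d (Nat.le_of_dvd (by omega) ⟨q, hq⟩) dvd_rfl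
      have esplit : (s.take (m + d)).count c =
          (s.take m).count c + ((s.drop m).take d).count c := by
        rw [List.take_add, List.count_append]
      have h2 : (s.take m).count c * s.length + ((s.drop m).take d).count c * s.length =
          m * s.count c + d * s.count c := by
        rw [← Nat.add_mul, ← esplit, e2, Nat.add_mul]
      rw [e1] at h2
      have e4 : ((s.drop m).take d).count c * s.length = d * s.count c :=
        Nat.add_left_cancel h2
      exact Nat.eq_of_mul_eq_mul_right (by omega) (e4.trans e3.symm)
    · have h1 : ((s.drop m).take d).count c = 0 := by
        rw [List.count_eq_zero_of_not_mem]
        intro hmem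
        exact hc (((List.take_sublist d (s.drop m)).trans (List.drop_sublist m s)).mem hmem)
      have h2 : (s.take d).count c = 0 := by
        rw [List.count_eq_zero_of_not_mem]
        intro hmem
        exact hc ((List.take_sublist d s).mem hmem)
      rw [h1, h2]

-- the prefix slice s[:i] and its length
theorem pvSlicePrefix (s : List Char) (i : Nat) :
    PySem.List.slice s (some 0) (some (i : Int)) = s.take i := by
  rw [PySem.List.slice_zero_start, PySem.List.slice_to_natCast]

theorem pvLenPrefix (s : List Char) (i : Nat) (hi : i ≤ s.length) :
    PySem.List.len (PySem.List.slice s (some 0) (some (i : Int))) = (i : Int) := by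
  rw [pvSlicePrefix, PySem.List.len_eq]
  simp [hi]

-- good[k] for 1 ≤ k ≤ n is the flag at k
theorem pvGoodLookup (s : List Char) (p : Nat) (hp1 : 1 ≤ p) (hpn : p ≤ s.length) :
    PySem.List.pyGetD (pvGood s) (p : Int) false = pvFlag s p := by
  rw [PySem.List.pyGetD_natCast, pvGood_eq]
  obtain ⟨p', rfl⟩ : ∃ p', p = p' + 1 := ⟨p - 1, by omega⟩
  rw [List.getD_cons_succ, PySem.List.getD_map_range _ _ _ _ (by omega)]

-- A's test at candidate length d equals B's test at d
theorem pvCondEq (s : List Char) (d : Nat) (h1 : 1 ≤ d) (hn : d ≤ s.length) :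
    pvCanFormWithAnagrams s (PySem.List.slice s (some 0) (some (d : Int))) =
      (PySem.Int.mod (PySem.List.len s) (d : Int) == 0
        && (PySem.List.pyRange (d : Int) (PySem.List.len s + 1) (d : Int)).all
             (fun k => PySem.List.pyGetD (pvGood s) k false)) := by
  have hdpos : (0 : Int) < (d : Int) := by exact_mod_cast h1
  unfold pvCanFormWithAnagrams
  rw [pvLenPrefix s d hn, PySem.List.len_eq, PySem.Int.mod_natCast]
  by_cases hmod : s.length % d = 0
  · have hdvd : d ∣ s.length := Nat.dvd_of_mod_eq_zero hmod
    rw [hmod]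
    simp only [Nat.cast_zero, beq_self_eq_true, Bool.true_and]
    rw [if_neg (not_not_intro rfl)]
    rw [Bool.eq_iff_iff, List.all_eq_true, List.all_eq_true]
    constructor
    · intro hA k hk
      obtain ⟨hk1, hk2, hk3⟩ := (PySem.List.mem_pyRange_iff_of_pos hdpos k).mp hk
      obtain ⟨p, rfl⟩ := Int.eq_ofNat_of_zero_le (le_trans (le_of_lt hdpos) hk1)
      have hdlep : d ≤ p := by exact_mod_cast hk1
      have hp1 : 1 ≤ p := by omega
      have hpn : p ≤ s.length := by
        have h' : (p : Int) < (s.length : Int) + 1 := hk2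
        have h'' : (p : Int) ≤ (s.length : Int) := by omega
        exact_mod_cast h''
      have hdp : d ∣ p := by
        have h' : (d : Int) ∣ (p : Int) := by
          have h'' := dvd_add hk3 (dvd_refl (d : Int))
          rwa [sub_add_cancel] at h''
        exact_mod_cast h'
      rw [pvGoodLookup s p hp1 hpn, pvFlag_iff]
      intro c hc
      refine ((pvCore s d h1 hdvd).mp ?_) p hp1 hpn hdp c hc
      intro m hm hdm c'
      have hAi := hA (m : Int) ((PySem.List.mem_pyRange_iff_of_pos hdpos (m : Int)).mpr
        ⟨by exact_mod_cast Nat.zero_le m, by exact_mod_cast hm, by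
          rw [sub_zero]; exact_mod_cast hdm⟩)
      rw [PySem.List.slice_natCast_add, pvSlicePrefix, beq_iff_eq,
        PySem.List.sorted_id_eq_sorted_id_iff_perm] at hAi
      exact (List.perm_iff_count.mp hAi) c'
    · intro hB i hi
      obtain ⟨hi1, hi2, hi3⟩ := (PySem.List.mem_pyRange_iff_of_pos hdpos i).mp hi
      obtain ⟨m, rfl⟩ := Int.eq_ofNat_of_zero_le hi1
      have hm : m < s.length := by exact_mod_cast hi2
      have hdm : d ∣ m := by
        rw [sub_zero] at hi3
        exact_mod_cast hi3
      rw [PySem.List.slice_natCast_add, pvSlicePrefix, beq_iff_eq,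
        PySem.List.sorted_id_eq_sorted_id_iff_perm, List.perm_iff_count]
      refine fun c => (pvCore s d h1 hdvd).mpr ?_ m hm hdm c
      intro p hp1 hpn hdp c' hc'
      have hBk := hB (p : Int) ((PySem.List.mem_pyRange_iff_of_pos hdpos (p : Int)).mpr
        ⟨by exact_mod_cast Nat.le_of_dvd (by omega) hdp, by
          have h' : (p : Int) ≤ (s.length : Int) := by exact_mod_cast hpn
          omega, by
          obtain ⟨a, ha⟩ := hdp
          exact ⟨(a : Int) - 1, by rw [ha]; push_cast; ring⟩⟩)
      rw [pvGoodLookup s p hp1 hpn, pvFlag_iff] at hBk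
      exact hBk c' hc'
  · have hne : ((s.length % d : Nat) : Int) ≠ 0 := by exact_mod_cast hmod
    rw [if_pos hne]
    rw [show (((s.length % d : Nat) : Int) == 0) = false from by
      rw [beq_eq_false_iff_ne]; exact hne]
    rw [Bool.false_and]

-- the two loops agree from any start 1 ≤ i
theorem pvLoop_eq (s : List Char) (i : Nat) (hi : 1 ≤ i) :
    pvLoopA s i = pvLoopB s (pvGood s) i := by
  unfold pvLoopA pvLoopB
  by_cases h : i ≤ s.length
  · rw [if_pos h, if_pos h]
    show (if pvCanFormWithAnagrams s (PySem.List.slice s (some 0) (some (i : Int))) = true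
          then PySem.List.len (PySem.List.slice s (some 0) (some (i : Int)))
          else pvLoopA s (i + 1)) = _
    rw [pvCondEq s i hi h]
    by_cases hc : (PySem.Int.mod (PySem.List.len s) (i : Int) == 0
        && (PySem.List.pyRange (i : Int) (PySem.List.len s + 1) (i : Int)).all
             (fun k => PySem.List.pyGetD (pvGood s) k false)) = true
    · rw [if_pos hc, if_pos hc]
      exact pvLenPrefix s i h
    · rw [if_neg hc, if_neg hc]
      exact pvLoop_eq s (i + 1) (by omega)
  · rw [if_neg h, if_neg h]
termination_by s.length + 1 - i

-- ===== VERDICT (by name: the statement is the Claim_ definition above) =====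
theorem getAnagramPeriod_spec : Claim_equal_getAnagramPeriod := by
  intro input_str _
  unfold Spec_getAnagramPeriod getAnagramPeriod getAnagramPeriod_alt
  exact pvLoop_eq input_str.toList 1 (le_refl 1)
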